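-- pv_equiv track=rewrite | github.com/fernandolucasaa/computerGeneratedHolography | generateDatasetMachineLearning.py | computeTargets
-- ===== SOURCE A (Python) =====
-- def computeTargets(array):
--     targets = []
--     y = 1
--     for i in range(len(array)):
--         targets.append(y)
--         if((i+1)%5 == 0):
--             y = y + 1
--     return targets
-- ===== SOURCE B (Python) =====
-- def computeTargets(array):
--     return [i // 5 + 1 for i in range(len(array))]
-- ===== Notes on version B (the rewrite author's own statement) =====
-- stated objective: simpler
-- what changed: Replaced the loop threading a conditionally incremented running counter y with a stateless one-line comprehension computing each target directly as i//5+1.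
import Mathlib
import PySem

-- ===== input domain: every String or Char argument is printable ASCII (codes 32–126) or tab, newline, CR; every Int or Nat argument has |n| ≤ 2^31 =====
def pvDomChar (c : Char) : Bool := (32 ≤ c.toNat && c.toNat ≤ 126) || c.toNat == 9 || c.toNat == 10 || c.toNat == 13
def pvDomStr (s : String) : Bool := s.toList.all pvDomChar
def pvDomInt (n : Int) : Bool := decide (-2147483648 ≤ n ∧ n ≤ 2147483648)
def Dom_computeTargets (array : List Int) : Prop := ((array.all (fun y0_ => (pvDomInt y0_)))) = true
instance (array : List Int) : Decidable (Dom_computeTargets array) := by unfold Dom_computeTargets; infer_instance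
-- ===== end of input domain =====

-- B replaces A's running-counter loop with a stateless comprehension i//5+1 (simpler decomposition; same cost).

-- ===== PORT A =====
def computeTargets (array : List Int) : List Int :=
  ((PySem.List.pyRange 0 (PySem.List.len array) 1).foldl
    (fun (st : List Int × Int) i =>
      (st.1 ++ [st.2], if PySem.Int.mod (i + 1) 5 = 0 then st.2 + 1 else st.2))
    ([], 1)).1

-- ===== PORT B =====
def computeTargets_alt (array : List Int) : List Int :=
  (PySem.List.pyRange 0 (PySem.List.len array) 1).map (fun i => PySem.Int.floordiv i 5 + 1)

-- ===== PRECONDITION & SPEC =====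
def Spec_computeTargets (array : List Int) (out : List Int) : Prop := out = computeTargets_alt array
instance (array : List Int) (out : List Int) : Decidable (Spec_computeTargets array out) := by unfold Spec_computeTargets; infer_instance

-- ===== CLAIM (what is proved, stated in full; the proofs are below) =====
def Claim_equal_computeTargets : Prop := ∀ (array : List Int), Dom_computeTargets array → Spec_computeTargets array (computeTargets array)

-- ===== LEMMAS AND PROOFS =====
theorem computeTargets_loop (n : Nat) :
    (PySem.List.pyRange 0 (n : Int) 1).foldl
      (fun (st : List Int × Int) i =>
        (st.1 ++ [st.2], if PySem.Int.mod (i + 1) 5 = 0 then st.2 + 1 else st.2))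
      ([], 1)
    = ((PySem.List.pyRange 0 (n : Int) 1).map (fun i => PySem.Int.floordiv i 5 + 1),
       ((n / 5 : Nat) : Int) + 1) := by
  induction n with
  | zero => simp [PySem.List.pyRange_one_eq_nil]
  | succ n ih =>
    have hsplit : ((n + 1 : Nat) : Int) = (n : Int) + 1 := by push_cast; ring
    rw [hsplit, PySem.List.pyRange_one_succ_right (by positivity)]
    rw [List.foldl_append, List.map_append, ih]
    simp only [List.foldl_cons, List.foldl_nil]
    have hdiv : PySem.Int.floordiv (n : Int) 5 = ((n / 5 : Nat) : Int) := by
      exact_mod_cast PySem.Int.floordiv_natCast n 5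
    have hmod : PySem.Int.mod ((n : Int) + 1) 5 = (((n + 1) % 5 : Nat) : Int) := by
      have := PySem.Int.mod_natCast (n + 1) 5
      push_cast at this ⊢; exact this
    rw [Prod.mk.injEq]
    constructor
    · simp
    · rw [hmod]
      by_cases h : (n + 1) % 5 = 0
      · have : (n + 1) / 5 = n / 5 + 1 := by omega
        simp [h, this]
      · have : (n + 1) / 5 = n / 5 := by omega
        simp [this]
        omega

-- ===== VERDICT (by name: the statement is the Claim_ definition above) =====
theorem computeTargets_spec : Claim_equal_computeTargets := by
  intro array _
  unfold Spec_computeTargets computeTargets computeTargets_alt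
  have h := computeTargets_loop array.length
  simp only [PySem.List.len_eq] at *
  rw [h]
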